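-- pv_equiv track=rewrite | github.com/First-Joel/COMS30017_2021 | coursework/DAQ1.py | decode_boundaries2
-- ===== SOURCE A (Python) =====
-- def decoder(single_spike_count,boundary):
--     if(single_spike_count>=boundary):
--         return 1
--     else:
--         return 0
--
-- def decoder_vs_true_value(trial,trial_ID,boundary):
--         prediction = decoder(len(trial),boundary)
--         if (trial_ID ==1 and prediction ==1):
--             return "TP"
--         elif(trial_ID==0 and prediction ==0):
--             return "TN"
--         elif (trial_ID ==0 and prediction ==1):
--             return "FP"
--         elif (trial_ID ==1 and prediction ==0):
--             return "FN"
--         else: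
--             return "ERROR not zero or one"
--
-- def decode_boundaries2(trials,trial_IDs):
--     tps = []
--     tns = []
--     tcs = []
--     for boundary in range(0,41):
--         true_positives = 0
--         true_negatives = 0
--         total_correct = 0
--         for t in range(0,len(trials)):
--             check = decoder_vs_true_value(trials[t],trial_IDs[t],boundary)
--             if (check == "TP"):
--                 true_positives+=1
--                 total_correct+=1
--             elif(check == "TN"):
--                 true_negatives+=1
--                 total_correct+=1
--         tps.append(true_positives)
--         tns.append(true_negatives)
--         tcs.append(total_correct)
--     return tps,tns,tcs
-- ===== SOURCE B (Python) =====
-- def decode_boundaries2(trials, trial_IDs):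
--     # A single pass over the trials builds histograms of capped spike counts
--     # (boundaries only go up to 40, so any count >= 41 behaves alike),
--     # then a running prefix sum yields all 41 boundary tallies.
--     pairs = list(zip(trials, trial_IDs))
--     pos_lens = [min(len(t), 41) for t, i in pairs if i == 1]
--     neg_lens = [min(len(t), 41) for t, i in pairs if i == 0]
--     pos = {}
--     for L in pos_lens:
--         pos[L] = pos.get(L, 0) + 1
--     neg = {}
--     for L in neg_lens:
--         neg[L] = neg.get(L, 0) + 1
--     tps = []
--     tns = []
--     tcs = []
--     tp = len(pos_lens)
--     tn = 0
--     for b in range(41):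
--         tps.append(tp)
--         tns.append(tn)
--         tcs.append(tp + tn)
--         tp -= pos.get(b, 0)
--         tn += neg.get(b, 0)
--     return tps, tns, tcs
-- ===== Notes on version B (the rewrite author's own statement) =====
-- stated objective: alternative
-- what changed: Instead of re-scanning all trials once per boundary (41 passes), B makes a single pass over the trials building histograms of capped spike counts for positive and negative trials, then derives all 41 TP/TN/correct tallies by a running prefix sum over the histograms.
import Mathlib
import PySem

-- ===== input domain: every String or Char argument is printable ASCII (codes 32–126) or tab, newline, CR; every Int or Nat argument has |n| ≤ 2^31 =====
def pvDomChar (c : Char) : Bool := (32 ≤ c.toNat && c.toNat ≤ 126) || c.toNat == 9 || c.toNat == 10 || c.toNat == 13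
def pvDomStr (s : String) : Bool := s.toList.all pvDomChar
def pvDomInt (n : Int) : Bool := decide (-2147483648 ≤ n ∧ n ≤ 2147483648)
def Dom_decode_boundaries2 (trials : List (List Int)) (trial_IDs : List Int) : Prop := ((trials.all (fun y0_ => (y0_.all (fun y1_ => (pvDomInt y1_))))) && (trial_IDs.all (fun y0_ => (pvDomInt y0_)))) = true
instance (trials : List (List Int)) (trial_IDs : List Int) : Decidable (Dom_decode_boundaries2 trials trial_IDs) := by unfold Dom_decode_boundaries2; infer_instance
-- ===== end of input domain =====

-- B replaces A's 41 counting passes over the trials by one histogram pass over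
-- capped spike counts plus a 41-step prefix-sum sweep (objective: alternative).

-- ===== PORT A =====
def pyDecoder (single_spike_count boundary : Int) : Int :=
  if boundary ≤ single_spike_count then 1 else 0

def pyDecoderVsTrueValue (trial : List Int) (trial_ID boundary : Int) : String :=
  let prediction := pyDecoder (trial.length : Int) boundary
  if trial_ID = 1 ∧ prediction = 1 then "TP"
  else if trial_ID = 0 ∧ prediction = 0 then "TN"
  else if trial_ID = 0 ∧ prediction = 1 then "FP"
  else if trial_ID = 1 ∧ prediction = 0 then "FN"
  else "ERROR not zero or one"

def decode_boundaries2 (trials : List (List Int)) (trial_IDs : List Int) : List Int × List Int × List Int :=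
  (PySem.List.pyRange 0 41 1).foldl (fun (acc : List Int × List Int × List Int) boundary =>
    let inner := (PySem.List.pyRange 0 (trials.length : Int) 1).foldl
      (fun (c : Int × Int × Int) t =>
        if pyDecoderVsTrueValue (PySem.List.pyGetD trials t []) (PySem.List.pyGetD trial_IDs t 0) boundary = "TP" then
          (c.1 + 1, c.2.1, c.2.2 + 1)
        else if pyDecoderVsTrueValue (PySem.List.pyGetD trials t []) (PySem.List.pyGetD trial_IDs t 0) boundary = "TN" then
          (c.1, c.2.1 + 1, c.2.2 + 1)
        else c) (0, 0, 0)
    (acc.1 ++ [inner.1], acc.2.1 ++ [inner.2.1], acc.2.2 ++ [inner.2.2])) ([], [], [])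

-- ===== PORT B =====
def decode_boundaries2_alt (trials : List (List Int)) (trial_IDs : List Int) : List Int × List Int × List Int :=
  let pairs := trials.zip trial_IDs
  let pos_lens := (pairs.filter (fun p => p.2 == 1)).map (fun p => min ((p.1.length : Int)) 41)
  let neg_lens := (pairs.filter (fun p => p.2 == 0)).map (fun p => min ((p.1.length : Int)) 41)
  let pos := pos_lens.foldl (fun (d : PySem.Dict Int Int) L => d.insert L (d.getD L 0 + 1)) PySem.Dict.empty
  let neg := neg_lens.foldl (fun (d : PySem.Dict Int Int) L => d.insert L (d.getD L 0 + 1)) PySem.Dict.empty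
  let fin := (PySem.List.pyRange 0 41 1).foldl
    (fun (acc : (List Int × List Int × List Int) × Int × Int) b =>
      ((acc.1.1 ++ [acc.2.1], acc.1.2.1 ++ [acc.2.2], acc.1.2.2 ++ [acc.2.1 + acc.2.2]),
        acc.2.1 - pos.getD b 0, acc.2.2 + neg.getD b 0))
    (([], [], []), (pos_lens.length : Int), 0)
  fin.1

-- ===== PRECONDITION & SPEC =====
-- A indexes trial_IDs[t] for every t < len(trials): a shorter trial_IDs raises IndexError.
def Pre_decode_boundaries2 (trials : List (List Int)) (trial_IDs : List Int) : Prop :=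
  trials.length ≤ trial_IDs.length
instance (trials : List (List Int)) (trial_IDs : List Int) : Decidable (Pre_decode_boundaries2 trials trial_IDs) := by unfold Pre_decode_boundaries2; infer_instance
def pvWitness_decode_boundaries2 : List (List Int) × List Int := ([[5], []], [1, 0])

def Spec_decode_boundaries2 (trials : List (List Int)) (trial_IDs : List Int) (out : List Int × List Int × List Int) : Prop := out = decode_boundaries2_alt trials trial_IDs
instance (trials : List (List Int)) (trial_IDs : List Int) (out : List Int × List Int × List Int) : Decidable (Spec_decode_boundaries2 trials trial_IDs out) := by unfold Spec_decode_boundaries2; infer_instance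

-- ===== CLAIM (what is proved, stated in full; the proofs are below) =====
def Claim_equal_decode_boundaries2 : Prop := ∀ (trials : List (List Int)) (trial_IDs : List Int), Dom_decode_boundaries2 trials trial_IDs → Pre_decode_boundaries2 trials trial_IDs → Spec_decode_boundaries2 trials trial_IDs (decode_boundaries2 trials trial_IDs)
-- ===== LEMMAS AND PROOFS =====

-- closed-form counts both programs are reduced to
def tpA (pairs : List (List Int × Int)) (b : Int) : Int :=
  (pairs.countP (fun p => decide (p.2 = 1 ∧ b ≤ (p.1.length : Int))) : Int)
def tnA (pairs : List (List Int × Int)) (b : Int) : Int :=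
  (pairs.countP (fun p => decide (p.2 = 0 ∧ (p.1.length : Int) < b)) : Int)
def cnt01 (P : List Int) (b : Int) : Int :=
  (P.countP (fun x => decide (0 ≤ x ∧ x < b)) : Int)
def capsOf (pairs : List (List Int × Int)) (v : Int) : List Int :=
  (pairs.filter (fun p => p.2 == v)).map (fun p => min ((p.1.length : Int)) 41)

lemma dvt_tp (tr : List Int) (id b : Int) :
    pyDecoderVsTrueValue tr id b = "TP" ↔ (id = 1 ∧ b ≤ (tr.length : Int)) := by
  by_cases hb : b ≤ (tr.length : Int) <;> by_cases hid1 : id = 1 <;> by_cases hid0 : id = 0 <;>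
    simp [pyDecoderVsTrueValue, pyDecoder, hb, hid1, hid0]

lemma dvt_tn (tr : List Int) (id b : Int) :
    pyDecoderVsTrueValue tr id b = "TN" ↔ (id = 0 ∧ (tr.length : Int) < b) := by
  by_cases hb : b ≤ (tr.length : Int) <;> by_cases hid1 : id = 1 <;> by_cases hid0 : id = 0 <;>
    simp [pyDecoderVsTrueValue, pyDecoder, hb, hid1, hid0] <;> omega

lemma innerA (pairs : List (List Int × Int)) (b : Int) (a c d : Int) :
    pairs.foldl (fun (c : Int × Int × Int) p =>
        if pyDecoderVsTrueValue p.1 p.2 b = "TP" then (c.1 + 1, c.2.1, c.2.2 + 1)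
        else if pyDecoderVsTrueValue p.1 p.2 b = "TN" then (c.1, c.2.1 + 1, c.2.2 + 1)
        else c) (a, c, d)
      = (a + tpA pairs b, c + tnA pairs b, d + tpA pairs b + tnA pairs b) := by
  induction pairs generalizing a c d with
  | nil => simp [tpA, tnA]
  | cons p rest ih =>
    simp only [List.foldl_cons]
    by_cases h1 : pyDecoderVsTrueValue p.1 p.2 b = "TP"
    · rw [if_pos h1, ih]
      rw [dvt_tp] at h1
      have h2 : ¬ (p.2 = 0 ∧ (p.1.length : Int) < b) := by omega
      simp only [tpA, tnA, List.countP_cons, h1, h2, decide_true, decide_false,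
        decide_eq_true_eq, if_true, if_false]
      push_cast
      refine Prod.ext ?_ (Prod.ext ?_ ?_) <;> simp <;> ring
    · rw [if_neg h1]
      by_cases h2 : pyDecoderVsTrueValue p.1 p.2 b = "TN"
      · rw [if_pos h2, ih]
        rw [dvt_tp] at h1
        rw [dvt_tn] at h2
        simp only [tpA, tnA, List.countP_cons, h1, h2, decide_true, decide_false,
          decide_eq_true_eq, if_true, if_false]
        push_cast
        refine Prod.ext ?_ (Prod.ext ?_ ?_) <;> simp <;> ring
      · rw [if_neg h2, ih]
        rw [dvt_tp] at h1
        rw [dvt_tn] at h2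
        simp only [tpA, tnA, List.countP_cons, h1, h2, decide_true, decide_false,
          decide_eq_true_eq, if_true, if_false]
        push_cast
        refine Prod.ext ?_ (Prod.ext ?_ ?_) <;> simp <;> ring

-- triple-append loop shape
lemma foldl_triple_append (l : List Int) (f g h : Int → Int) (X Y Z : List Int) :
    l.foldl (fun (acc : List Int × List Int × List Int) b =>
        (acc.1 ++ [f b], acc.2.1 ++ [g b], acc.2.2 ++ [h b])) (X, Y, Z)
      = (X ++ l.map f, Y ++ l.map g, Z ++ l.map h) := by
  induction l generalizing X Y Z with
  | nil => simp
  | cons x xs ih => simp [ih]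

lemma A_closed (trials : List (List Int)) (trial_IDs : List Int)
    (h : trials.length ≤ trial_IDs.length) :
    decode_boundaries2 trials trial_IDs =
      ((PySem.List.pyRange 0 41 1).map (fun b => tpA (trials.zip trial_IDs) b),
       (PySem.List.pyRange 0 41 1).map (fun b => tnA (trials.zip trial_IDs) b),
       (PySem.List.pyRange 0 41 1).map (fun b => tpA (trials.zip trial_IDs) b + tnA (trials.zip trial_IDs) b)) := by
  have hzlen : (trials.zip trial_IDs).length = trials.length := by
    rw [List.length_zip]; omega
  have hinner : ∀ b : Int,
      (PySem.List.pyRange 0 (trials.length : Int) 1).foldl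
        (fun (c : Int × Int × Int) t =>
          if pyDecoderVsTrueValue (PySem.List.pyGetD trials t []) (PySem.List.pyGetD trial_IDs t 0) b = "TP" then
            (c.1 + 1, c.2.1, c.2.2 + 1)
          else if pyDecoderVsTrueValue (PySem.List.pyGetD trials t []) (PySem.List.pyGetD trial_IDs t 0) b = "TN" then
            (c.1, c.2.1 + 1, c.2.2 + 1)
          else c) (0, 0, 0)
      = (tpA (trials.zip trial_IDs) b, tnA (trials.zip trial_IDs) b,
         tpA (trials.zip trial_IDs) b + tnA (trials.zip trial_IDs) b) := by
    intro b
    have hlen' : (trials.length : Int) = ((trials.zip trial_IDs).length : Int) := by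
      rw [hzlen]
    rw [hlen']
    rw [PySem.List.foldl_congr_mem _ _
      (fun (c : Int × Int × Int) t =>
        if pyDecoderVsTrueValue (PySem.List.pyGetD (trials.zip trial_IDs) t ([], 0)).1
             (PySem.List.pyGetD (trials.zip trial_IDs) t ([], 0)).2 b = "TP" then
          (c.1 + 1, c.2.1, c.2.2 + 1)
        else if pyDecoderVsTrueValue (PySem.List.pyGetD (trials.zip trial_IDs) t ([], 0)).1
             (PySem.List.pyGetD (trials.zip trial_IDs) t ([], 0)).2 b = "TN" then
          (c.1, c.2.1 + 1, c.2.2 + 1)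
        else c) _ ?_]
    · rw [PySem.List.foldl_pyRange_zero_pyGetD' (trials.zip trial_IDs) ([], 0)
        (fun (c : Int × Int × Int) p =>
          if pyDecoderVsTrueValue p.1 p.2 b = "TP" then (c.1 + 1, c.2.1, c.2.2 + 1)
          else if pyDecoderVsTrueValue p.1 p.2 b = "TN" then (c.1, c.2.1 + 1, c.2.2 + 1)
          else c) (0, 0, 0)]
      rw [innerA]
      simp
    · intro acc t ht
      rw [PySem.List.mem_pyRange_one] at ht
      obtain ⟨ht0, htlt⟩ := ht
      obtain ⟨k, rfl⟩ : ∃ k : Nat, t = (k : Int) := ⟨t.toNat, by omega⟩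
      have hklt : k < (trials.zip trial_IDs).length := by omega
      have h1 : k < trials.length := by omega
      have h2 : k < trial_IDs.length := by omega
      simp only [PySem.List.pyGetD_natCast, List.getD_eq_getElem _ _ hklt,
        List.getD_eq_getElem _ _ h1, List.getD_eq_getElem _ _ h2, List.getElem_zip]
  unfold decode_boundaries2
  rw [PySem.List.foldl_congr_mem _ _
    (fun (acc : List Int × List Int × List Int) b =>
      (acc.1 ++ [tpA (trials.zip trial_IDs) b], acc.2.1 ++ [tnA (trials.zip trial_IDs) b],
       acc.2.2 ++ [tpA (trials.zip trial_IDs) b + tnA (trials.zip trial_IDs) b])) _ ?_]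
  · rw [foldl_triple_append]
    simp
  · intro acc bb _
    simp only [hinner bb]

lemma cnt01_zero (P : List Int) : cnt01 P 0 = 0 := by
  simp [cnt01]

lemma cnt01_succ (P : List Int) (m : Nat) :
    cnt01 P ((m : Int) + 1) = cnt01 P (m : Int) + (P.count (m : Int) : Int) := by
  induction P with
  | nil => simp [cnt01]
  | cons x l ih =>
    simp only [cnt01, List.countP_cons, List.count_cons, decide_eq_true_eq, beq_iff_eq] at ih ⊢
    push_cast at ih ⊢
    split_ifs <;> omega

lemma Bfold (P N : List Int) (m : Nat) :
    (PySem.List.pyRange 0 (m : Int) 1).foldl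
      (fun (acc : (List Int × List Int × List Int) × Int × Int) b =>
        ((acc.1.1 ++ [acc.2.1], acc.1.2.1 ++ [acc.2.2], acc.1.2.2 ++ [acc.2.1 + acc.2.2]),
          acc.2.1 - (P.count b : Int), acc.2.2 + (N.count b : Int)))
      (([], [], []), (P.length : Int), 0)
    = (((PySem.List.pyRange 0 (m : Int) 1).map (fun b => (P.length : Int) - cnt01 P b),
        (PySem.List.pyRange 0 (m : Int) 1).map (fun b => cnt01 N b),
        (PySem.List.pyRange 0 (m : Int) 1).map (fun b => (P.length : Int) - cnt01 P b + cnt01 N b)),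
       (P.length : Int) - cnt01 P (m : Int), cnt01 N (m : Int)) := by
  induction m with
  | zero => simp [PySem.List.pyRange_one_eq_nil, cnt01_zero]
  | succ m ih =>
    have hstep : ((m + 1 : Nat) : Int) = (m : Int) + 1 := by push_cast; ring
    rw [hstep, PySem.List.pyRange_one_succ_right (by positivity), List.foldl_append, ih]
    simp only [List.foldl_cons, List.foldl_nil, List.map_append, List.map_cons, List.map_nil,
      cnt01_succ, Prod.mk.injEq]
    and_intros <;> first | rfl | trivial | ring

lemma B_closed (trials : List (List Int)) (trial_IDs : List Int) :
    decode_boundaries2_alt trials trial_IDs =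
      ((PySem.List.pyRange 0 41 1).map (fun b => ((capsOf (trials.zip trial_IDs) 1).length : Int) - cnt01 (capsOf (trials.zip trial_IDs) 1) b),
       (PySem.List.pyRange 0 41 1).map (fun b => cnt01 (capsOf (trials.zip trial_IDs) 0) b),
       (PySem.List.pyRange 0 41 1).map (fun b => ((capsOf (trials.zip trial_IDs) 1).length : Int) - cnt01 (capsOf (trials.zip trial_IDs) 1) b + cnt01 (capsOf (trials.zip trial_IDs) 0) b)) := by
  unfold decode_boundaries2_alt
  have hpos : ∀ b : Int,
      (((trials.zip trial_IDs).filter (fun p => p.2 == 1)).map (fun p => min ((p.1.length : Int)) 41)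
        |>.foldl (fun (d : PySem.Dict Int Int) L => d.insert L (d.getD L 0 + 1)) PySem.Dict.empty).getD b 0
      = ((capsOf (trials.zip trial_IDs) 1).count b : Int) := by
    intro b
    rw [PySem.Dict.getD_foldl_insert_add_one, PySem.Dict.getD_empty]
    simp [capsOf]
  have hneg : ∀ b : Int,
      (((trials.zip trial_IDs).filter (fun p => p.2 == 0)).map (fun p => min ((p.1.length : Int)) 41)
        |>.foldl (fun (d : PySem.Dict Int Int) L => d.insert L (d.getD L 0 + 1)) PySem.Dict.empty).getD b 0
      = ((capsOf (trials.zip trial_IDs) 0).count b : Int) := by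
    intro b
    rw [PySem.Dict.getD_foldl_insert_add_one, PySem.Dict.getD_empty]
    simp [capsOf]
  simp only [hpos, hneg]
  have h41 : (41 : Int) = ((41 : Nat) : Int) := by norm_num
  have hlenP : (((trials.zip trial_IDs).filter (fun p => p.2 == 1)).map (fun p => min ((p.1.length : Int)) 41)).length
      = (capsOf (trials.zip trial_IDs) 1).length := by simp [capsOf]
  rw [hlenP, h41, Bfold (capsOf (trials.zip trial_IDs) 1) (capsOf (trials.zip trial_IDs) 0) 41]

lemma point_tp (pairs : List (List Int × Int)) (b : Int) (hb : b ≤ 41) :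
    ((capsOf pairs 1).length : Int) - cnt01 (capsOf pairs 1) b = tpA pairs b := by
  induction pairs with
  | nil => simp [capsOf, cnt01, tpA]
  | cons p rest ih =>
    by_cases hid : p.2 = 1 <;>
      simp only [capsOf, cnt01, tpA, List.filter_cons, List.countP_cons, List.map_cons,
        List.length_cons, hid, beq_self_eq_true, beq_iff_eq, if_true, if_false,
        decide_eq_true_eq, decide_true, decide_false] at ih ⊢ <;>
      push_cast at ih ⊢ <;> split_ifs <;> simp_all <;> omega

lemma point_tn (pairs : List (List Int × Int)) (b : Int) (hb : b ≤ 41) :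
    cnt01 (capsOf pairs 0) b = tnA pairs b := by
  induction pairs with
  | nil => simp [capsOf, cnt01, tnA]
  | cons p rest ih =>
    by_cases hid : p.2 = 0 <;>
      simp only [capsOf, cnt01, tnA, List.filter_cons, List.countP_cons, List.map_cons,
        List.length_cons, hid, beq_self_eq_true, beq_iff_eq, if_true, if_false,
        decide_eq_true_eq, decide_true, decide_false] at ih ⊢ <;>
      push_cast at ih ⊢ <;> split_ifs <;> simp_all <;> omega

-- ===== VERDICT (by name: the statement is the Claim_ definition above) =====
theorem decode_boundaries2_spec : Claim_equal_decode_boundaries2 := by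
  intro trials trial_IDs _hdom hpre
  unfold Spec_decode_boundaries2
  rw [A_closed trials trial_IDs hpre, B_closed trials trial_IDs]
  refine Prod.ext ?_ (Prod.ext ?_ ?_) <;>
    · simp only []
      apply List.map_congr_left
      intro b hb
      rw [PySem.List.mem_pyRange_one] at hb
      first
        | rw [point_tp _ _ (by omega), point_tn _ _ (by omega)]
        | rw [point_tp _ _ (by omega)]
        | rw [point_tn _ _ (by omega)]
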